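-- pv_equiv track=rewrite | github.com/noahdimonti/EV_charging_model | src/visualisation/preliminary_analysis.py | calculate_durations
-- ===== SOURCE A (Python) =====
-- def calculate_durations(series, resolution_minutes=15):
--     durations = []
--     current_duration = 0
--     for value in series:
--         if value == 1:
--             current_duration += resolution_minutes
--         elif current_duration > 0:
--             durations.append(current_duration)
--             current_duration = 0
--     if current_duration > 0:  # Capture any remaining duration
--         durations.append(current_duration)
--     return durations
-- ===== SOURCE B (Python) =====
-- from itertools import groupby
--
--
-- def calculate_durations(series, resolution_minutes=15):
--     durations = [sum(1 for _ in group) * resolution_minutes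
--                  for value, group in groupby(series) if value == 1]
--     return [d for d in durations if d > 0]
-- ===== Notes on version B (the rewrite author's own statement) =====
-- stated objective: idiomatic
-- what changed: Replaces the streaming accumulate/flush state machine with itertools.groupby: materialize maximal runs, keep groups keyed by 1, map run length * resolution_minutes, and keep the positive durations (A only ever emits positive values).
import Mathlib
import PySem

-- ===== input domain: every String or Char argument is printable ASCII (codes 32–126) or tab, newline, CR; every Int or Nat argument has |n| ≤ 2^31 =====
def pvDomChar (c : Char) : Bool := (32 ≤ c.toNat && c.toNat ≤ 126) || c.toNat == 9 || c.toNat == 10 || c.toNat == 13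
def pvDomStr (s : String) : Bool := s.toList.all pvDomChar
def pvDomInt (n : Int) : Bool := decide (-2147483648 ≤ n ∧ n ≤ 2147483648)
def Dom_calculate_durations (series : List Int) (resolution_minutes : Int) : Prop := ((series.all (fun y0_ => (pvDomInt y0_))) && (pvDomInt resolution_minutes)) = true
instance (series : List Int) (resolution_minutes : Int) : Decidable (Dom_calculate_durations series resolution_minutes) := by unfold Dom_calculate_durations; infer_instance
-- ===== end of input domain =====

-- B replaces A's streaming accumulate/flush state machine by a groupby pass over
-- maximal runs (idiomatic decomposition; same O(n) cost).

-- ===== PORT A =====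
-- literal port: the loop is a foldl over the state (durations, current_duration),
-- followed by the trailing flush.
def calculate_durations (series : List Int) (resolution_minutes : Int) : List Int :=
  let st := series.foldl
    (fun (st : List Int × Int) value =>
      if value == 1 then (st.1, st.2 + resolution_minutes)
      else if st.2 > 0 then (st.1 ++ [st.2], (0 : Int))
      else st) ([], 0)
  if st.2 > 0 then st.1 ++ [st.2] else st.1

-- ===== PORT B =====
-- hand-written port of itertools.groupby on a list: the list of (key, run) pairs
-- for maximal runs of equal values; exact for lists of ints.
def pyGroupby : List Int → List (Int × List Int)
  | [] => []
  | v :: rest =>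
      (v, v :: rest.takeWhile (· == v)) :: pyGroupby (rest.dropWhile (· == v))
termination_by l => l.length
decreasing_by
  simp only [List.length_cons]
  exact Nat.lt_succ_of_le (List.length_dropWhile_le _ _)

def calculate_durations_alt (series : List Int) (resolution_minutes : Int) : List Int :=
  let durations := ((pyGroupby series).filter (fun p => p.1 == 1)).map
    (fun p => (p.2.length : Int) * resolution_minutes)
  durations.filter (fun d => d > 0)

-- ===== PRECONDITION & SPEC =====
def Spec_calculate_durations (series : List Int) (resolution_minutes : Int) (out : List Int) : Prop := out = calculate_durations_alt series resolution_minutes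
instance (series : List Int) (resolution_minutes : Int) (out : List Int) : Decidable (Spec_calculate_durations series resolution_minutes out) := by unfold Spec_calculate_durations; infer_instance

-- ===== CLAIM (what is proved, stated in full; the proofs are below) =====
def Claim_equal_calculate_durations : Prop := ∀ (series : List Int) (resolution_minutes : Int), Dom_calculate_durations series resolution_minutes → Spec_calculate_durations series resolution_minutes (calculate_durations series resolution_minutes)

-- ===== LEMMAS AND PROOFS =====

-- canonical recursive characterisation of A's loop (proof-side only)
def specRec (res : Int) : List Int → Int → List Int
  | [], cur => if cur > 0 then [cur] else []
  | v :: rest, cur =>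
      if v = 1 then specRec res rest (cur + res)
      else if cur > 0 then cur :: specRec res rest 0
      else specRec res rest cur

-- A's foldl + trailing flush equals acc ++ specRec
theorem foldA_eq_specRec (res : Int) (series : List Int) :
    ∀ (acc : List Int) (cur : Int),
    (let st := series.foldl
        (fun (st : List Int × Int) value =>
          if value == 1 then (st.1, st.2 + res)
          else if st.2 > 0 then (st.1 ++ [st.2], (0 : Int))
          else st) (acc, cur);
      if st.2 > 0 then st.1 ++ [st.2] else st.1) = acc ++ specRec res series cur := by
  induction series with
  | nil =>
      intro acc cur
      simp only [List.foldl_nil, specRec]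
      split <;> simp
  | cons v rest ih =>
      intro acc cur
      simp only [List.foldl_cons, specRec]
      by_cases hv : v = 1
      · have h := ih acc (cur + res)
        simp only [hv] at *
        simpa using h
      · by_cases hc : cur > 0
        · have h := ih (acc ++ [cur]) 0
          simp [hv, hc]
          simpa [List.append_assoc] using h
        · have h := ih acc cur
          simp [hv, hc]
          simpa using h

theorem A_eq_specRec (series : List Int) (res : Int) :
    calculate_durations series res = specRec res series 0 := by
  have h := foldA_eq_specRec res series [] 0
  simpa [calculate_durations] using h

-- if res ≤ 0 the accumulator never becomes positive and A emits nothing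
theorem specRec_nonpos (res : Int) (hres : ¬ 0 < res) :
    ∀ (l : List Int) (cur : Int), cur ≤ 0 → specRec res l cur = [] := by
  intro l
  induction l with
  | nil => intro cur hc; simp [specRec]; omega
  | cons v t ih =>
      intro cur hc
      rw [specRec]
      by_cases hv : v = 1
      · rw [if_pos hv]; exact ih _ (by omega)
      · rw [if_neg hv, if_neg (by omega)]; exact ih _ hc

-- skipping a run of non-1 values with cur = 0
theorem specRec_skip (res v : Int) (hv : v ≠ 1) (rest : List Int) :
    specRec res rest 0 = specRec res (rest.dropWhile (· == v)) 0 := by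
  induction rest with
  | nil => simp
  | cons w t ih =>
      by_cases hw : w = v
      · subst hw
        simp only [List.dropWhile_cons, beq_self_eq_true, if_pos]
        rw [specRec, if_neg hv, if_neg (by omega)]
        exact ih
      · simp [hw]

-- consuming a run of 1s accumulates (length of run) * res
theorem specRec_ones (res : Int) (rest : List Int) :
    ∀ cur, specRec res rest cur =
      specRec res (rest.dropWhile (· == (1 : Int)))
        (cur + ((rest.takeWhile (· == (1 : Int))).length : Int) * res) := by
  induction rest with
  | nil => intro cur; simp
  | cons w t ih =>
      intro cur
      by_cases hw : w = (1 : Int)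
      · rw [specRec, if_pos hw]
        simp only [List.takeWhile_cons, List.dropWhile_cons, hw, beq_self_eq_true, if_pos]
        rw [ih]
        congr 1
        push_cast [List.length_cons]
        ring
      · simp [hw]

-- flushing: if the list does not start with 1 and cur ≥ 0, cur can be emitted up front
theorem specRec_flush (res : Int) (l : List Int)
    (h : ∀ w t, l = w :: t → w ≠ 1) (cur : Int) (hc : 0 ≤ cur) :
    specRec res l cur = (if cur > 0 then [cur] else []) ++ specRec res l 0 := by
  cases l with
  | nil => rw [specRec, specRec]; split <;> simp
  | cons w t =>
      have hw : w ≠ 1 := h w t rfl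
      rw [specRec, specRec]
      simp only [if_neg hw]
      by_cases hpos : cur > 0
      · simp [hpos]
      · have : cur = 0 := by omega
        subst this
        simp

theorem head_dropWhile_ne (v : Int) (l : List Int) :
    ∀ w t, l.dropWhile (· == v) = w :: t → w ≠ v := by
  intro w t h
  have h2 := List.head?_dropWhile_not (p := (· == v)) (l := l)
  rw [h] at h2
  simp at h2
  intro hv
  exact absurd hv (by simpa using h2)

-- groups produced by pyGroupby are nonempty, so with res ≤ 0 every duration is ≤ 0
theorem alt_nonpos (res : Int) (hres : ¬ 0 < res) (series : List Int) :
    calculate_durations_alt series res = [] := by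
  unfold calculate_durations_alt
  rw [List.filter_eq_nil_iff]
  intro d hd
  simp only [List.mem_map, List.mem_filter] at hd
  obtain ⟨p, _, hp⟩ := hd
  have : ((p.2.length : Int)) * res ≤ 0 :=
    mul_nonpos_of_nonneg_of_nonpos (by positivity) (by omega)
  simp only [decide_eq_true_eq]
  omega

-- main lemma for res > 0: specRec = B's groupby formulation
theorem specRec_eq_alt_pos (res : Int) (hres : 0 < res) : ∀ (series : List Int),
    specRec res series 0 = calculate_durations_alt series res := by
  intro series
  induction hn : series.length using Nat.strong_induction_on generalizing series with
  | _ n ih =>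
    subst hn
    cases series with
    | nil => simp [specRec, calculate_durations_alt, pyGroupby]
    | cons v rest =>
      have hdrop : (rest.dropWhile (· == v)).length < (v :: rest).length :=
        Nat.lt_succ_of_le (List.length_dropWhile_le _ _)
      by_cases hv : v = 1
      · subst hv
        rw [specRec, if_pos rfl, zero_add, specRec_ones res rest res]
        have hcur : res + ((rest.takeWhile (· == (1:Int))).length : Int) * res
            = (((1:Int) :: rest.takeWhile (· == (1:Int))).length : Int) * res := by
          push_cast [List.length_cons]
          ring
        rw [specRec_flush res _ (fun w t h => head_dropWhile_ne 1 rest w t h) _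
              (by positivity)]
        rw [ih _ hdrop _ rfl, hcur]
        simp only [calculate_durations_alt, pyGroupby]
        have hpos2 : (0:Int) < (((1:Int) :: rest.takeWhile (· == (1:Int))).length : Int) * res :=
          mul_pos (by exact_mod_cast Nat.succ_pos _) hres
        simp only [List.filter_cons, List.length_cons] at *
        push_cast at *
        simp [hpos2]
      · rw [specRec, if_neg hv, if_neg (by omega), specRec_skip res v hv rest]
        rw [ih _ hdrop _ rfl]
        simp only [calculate_durations_alt, pyGroupby]
        rw [List.filter_cons]
        simp [hv]

-- ===== VERDICT (by name: the statement is the Claim_ definition above) =====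
theorem calculate_durations_spec : Claim_equal_calculate_durations := by
  intro series res _
  unfold Spec_calculate_durations
  rw [A_eq_specRec]
  by_cases hres : 0 < res
  · exact specRec_eq_alt_pos res hres series
  · rw [specRec_nonpos res hres series 0 le_rfl, alt_nonpos res hres series]
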